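-- pv_equiv track=rewrite | github.com/Mycelium-Lab/olympus_backend_v2 | app/scripts/indexes.py | searchNearestHours
-- ===== SOURCE A (Python) =====
-- def searchNearestHours(start, dicts):
--
-- 	if start <= 1623700800:
--
-- 		return 0
--
-- 	else:
--
-- 		for i in range(start, 1623700800, -3600):
--
-- 			if i in dicts:
--
-- 				return dicts[i]
--
-- 		return dicts[1623700800]
-- ===== SOURCE B (Python) =====
-- def searchNearestHours(start, dicts):
--     if start <= 1623700800:
--         return 0
--     cand = [k for k in dicts if 1623700800 < k <= start and (start - k) % 3600 == 0]
--     if cand: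
--         return dicts[max(cand)]
--     return dicts[1623700800]
-- ===== Notes on version B (the rewrite author's own statement) =====
-- stated objective: alternative
-- what changed: Instead of probing the stepped-back arithmetic sequence start, start-3600, ... for dict membership, B scans the stored keys once and returns the value of the largest hour-aligned key in (1623700800, start], falling back to dicts[1623700800].
import Mathlib
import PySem

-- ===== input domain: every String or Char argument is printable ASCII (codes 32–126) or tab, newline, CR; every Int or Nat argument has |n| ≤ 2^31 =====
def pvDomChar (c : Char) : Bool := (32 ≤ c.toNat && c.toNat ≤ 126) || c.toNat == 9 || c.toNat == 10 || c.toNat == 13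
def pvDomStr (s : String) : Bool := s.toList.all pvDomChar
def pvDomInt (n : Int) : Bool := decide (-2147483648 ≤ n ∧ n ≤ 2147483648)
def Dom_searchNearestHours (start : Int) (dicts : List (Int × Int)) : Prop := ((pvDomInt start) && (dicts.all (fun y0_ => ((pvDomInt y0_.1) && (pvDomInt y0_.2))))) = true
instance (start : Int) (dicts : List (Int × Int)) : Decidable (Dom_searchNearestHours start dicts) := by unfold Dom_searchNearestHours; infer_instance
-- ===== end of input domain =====

-- B replaces A's probe of the stepped-back timestamp sequence by a single scan of the
-- stored keys selecting the maximal hour-aligned one (objective: alternative algorithm).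
-- Both ports model Python's dict[k] (first match) with pyLookupD; KeyError inputs are excluded by Pre_.

-- shared primitive: dicts[k] with default (Pre_ guarantees the default is never the result)
def pyLookupD (dicts : List (Int × Int)) (k dflt : Int) : Int :=
  match dicts.find? (fun p => p.1 == k) with
  | some p => p.2
  | none => dflt

-- shared primitive: 'k in dicts'
def hasKey (dicts : List (Int × Int)) (k : Int) : Bool := dicts.any (fun p => p.1 == k)

-- ===== PORT A =====
-- 'for i in range(start, 1623700800, -3600): if i in dicts: return dicts[i]' / fallthrough 'return dicts[1623700800]'
def searchLoop (dicts : List (Int × Int)) : List Int → Int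
  | [] => pyLookupD dicts 1623700800 0
  | i :: rest => if hasKey dicts i then pyLookupD dicts i 0 else searchLoop dicts rest

def searchNearestHours (start : Int) (dicts : List (Int × Int)) : Int :=
  if start ≤ 1623700800 then 0
  else searchLoop dicts (PySem.List.pyRange start 1623700800 (-3600))

-- ===== PORT B =====
-- '[k for k in dicts if 1623700800 < k <= start and (start - k) % 3600 == 0]'
def hourCandidates (start : Int) (dicts : List (Int × Int)) : List Int :=
  (dicts.map (fun p => p.1)).filter
    (fun k => decide (1623700800 < k) && decide (k ≤ start) && (PySem.Int.mod (start - k) 3600 == 0))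

def searchNearestHours_alt (start : Int) (dicts : List (Int × Int)) : Int :=
  if start ≤ 1623700800 then 0
  else
    match (hourCandidates start dicts).max? with
    | some m => pyLookupD dicts m 0
    | none => pyLookupD dicts 1623700800 0

-- ===== PRECONDITION & SPEC =====
-- Pre_ excludes exactly the inputs where Python A raises KeyError (start above the base,
-- no hour-aligned key in (1623700800, start], and key 1623700800 absent); B raises there too.
def Pre_searchNearestHours (start : Int) (dicts : List (Int × Int)) : Prop :=
  start ≤ 1623700800 ∨
  (∃ p ∈ dicts, p.1 = 1623700800) ∨
  (∃ p ∈ dicts, 1623700800 < p.1 ∧ p.1 ≤ start ∧ PySem.Int.mod (start - p.1) 3600 = 0)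

instance (start : Int) (dicts : List (Int × Int)) : Decidable (Pre_searchNearestHours start dicts) := by
  unfold Pre_searchNearestHours; infer_instance

def pvWitness_searchNearestHours : Int × (List (Int × Int)) := (1623708000, [(1623704400, 7), (1623700800, 9)])

def Spec_searchNearestHours (start : Int) (dicts : List (Int × Int)) (out : Int) : Prop := out = searchNearestHours_alt start dicts
instance (start : Int) (dicts : List (Int × Int)) (out : Int) : Decidable (Spec_searchNearestHours start dicts out) := by unfold Spec_searchNearestHours; infer_instance

-- ===== CLAIM (what is proved, stated in full; the proofs are below) =====
def Claim_equal_searchNearestHours : Prop := ∀ (start : Int) (dicts : List (Int × Int)), Dom_searchNearestHours start dicts → Pre_searchNearestHours start dicts → Spec_searchNearestHours start dicts (searchNearestHours start dicts)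

-- ===== LEMMAS AND PROOFS =====

-- membership in A's probe sequence range(a, b, -3600)
lemma mem_pyRange_negstep (a b x : Int) :
    x ∈ PySem.List.pyRange a b (-3600) ↔ b < x ∧ x ≤ a ∧ (3600 : Int) ∣ a - x := by
  unfold PySem.List.pyRange
  simp only [if_neg (by norm_num : (-3600 : Int) ≠ 0)]
  norm_num
  constructor
  · rintro ⟨k, hk, rfl⟩
    split_ifs at hk with h
    · have hk' : (k : Int) < (a - b + 3599) / 3600 := by omega
      refine ⟨by omega, by omega, ⟨k, by ring⟩⟩
    · omega
  · rintro ⟨h1, h2, ⟨c, hc⟩⟩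
    refine ⟨c.toNat, ?_, by omega⟩
    split_ifs with h
    · omega
    · omega

-- A's probe sequence is strictly decreasing
lemma pairwise_gt_pyRange_negstep (a b : Int) :
    (PySem.List.pyRange a b (-3600)).Pairwise (· > ·) := by
  unfold PySem.List.pyRange
  simp only [if_neg (by norm_num : (-3600 : Int) ≠ 0),
             if_neg (by norm_num : ¬ (0:Int) < -3600)]
  refine List.pairwise_map.mpr (List.pairwise_lt_range.imp ?_)
  intro i j hij
  omega

-- first hit of A's loop on a strictly decreasing probe list = maximum of the hits
lemma searchLoop_eq_max (dicts : List (Int × Int)) (L : List Int) (hL : L.Pairwise (· > ·)) :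
    searchLoop dicts L =
      match (L.filter (hasKey dicts)).max? with
      | some m => pyLookupD dicts m 0
      | none => pyLookupD dicts 1623700800 0 := by
  induction L with
  | nil => rfl
  | cons i rest ih =>
    rcases List.pairwise_cons.mp hL with ⟨hlt, hrest⟩
    by_cases h : hasKey dicts i
    · have hfil : (i :: rest).filter (hasKey dicts) = i :: rest.filter (hasKey dicts) := by
        simp [List.filter, h]
      have hmax : (i :: rest.filter (hasKey dicts)).max? = some i := by
        rw [List.max?_eq_some_iff]
        refine ⟨List.mem_cons_self, ?_⟩
        intro b hb
        rcases List.mem_cons.mp hb with rfl | hb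
        · exact le_refl b
        · exact le_of_lt (hlt b (List.mem_of_mem_filter hb))
      simp [searchLoop, h, hfil, hmax]
    · have hfil : (i :: rest).filter (hasKey dicts) = rest.filter (hasKey dicts) := by
        simp [List.filter, h]
      simp only [searchLoop, h, hfil]
      exact ih hrest

-- two lists with the same members have the same max?
lemma max?_congr_mem {M N : List Int} (h : ∀ x, x ∈ M ↔ x ∈ N) : M.max? = N.max? := by
  cases hM : M.max? with
  | none =>
    rw [List.max?_eq_none_iff] at hM
    subst hM
    cases hN : N.max? with
    | none => rfl
    | some y =>
      rw [List.max?_eq_some_iff] at hN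
      exact absurd ((h y).mpr hN.1) (List.not_mem_nil)
  | some x =>
    rw [List.max?_eq_some_iff] at hM
    symm
    rw [List.max?_eq_some_iff]
    exact ⟨(h x).mp hM.1, fun b hb => hM.2 b ((h b).mpr hb)⟩

-- B's candidate list has the same members as A's hit list
lemma candidates_mem (start : Int) (dicts : List (Int × Int)) (x : Int) :
    x ∈ (PySem.List.pyRange start 1623700800 (-3600)).filter (hasKey dicts) ↔
      x ∈ hourCandidates start dicts := by
  simp only [List.mem_filter, mem_pyRange_negstep, hourCandidates, List.mem_map, hasKey,
    List.any_eq_true, beq_iff_eq, Bool.and_eq_true, decide_eq_true_eq,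
    PySem.Int.mod_eq_zero_iff_dvd]
  constructor
  · rintro ⟨⟨h1, h2, h3⟩, p, hp, rfl⟩
    exact ⟨⟨p, hp, rfl⟩, ⟨h1, h2⟩, h3⟩
  · rintro ⟨⟨p, hp, rfl⟩, ⟨h1, h2⟩, h3⟩
    exact ⟨⟨h1, h2, h3⟩, p, hp, rfl⟩

-- ===== VERDICT (by name: the statement is the Claim_ definition above) =====
theorem searchNearestHours_spec : Claim_equal_searchNearestHours := by
  intro start dicts _ _
  unfold Spec_searchNearestHours searchNearestHours searchNearestHours_alt
  by_cases h : start ≤ 1623700800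
  · simp [h]
  · simp only [h, if_false]
    rw [searchLoop_eq_max dicts _ (pairwise_gt_pyRange_negstep start 1623700800),
        max?_congr_mem (candidates_mem start dicts)]
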